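-- pv_equiv track=rewrite | github.com/tarstars/titanic_mle | titanic_mle/submissions.py | tokenize_meta
-- ===== SOURCE A (Python) =====
-- def tokenize_meta(text: str) -> list[str]:
--     tokens: list[str] = []
--     current: list[str] = []
--     for ch in text:
--         if ch in "()":
--             if current:
--                 tokens.append("".join(current))
--                 current.clear()
--             tokens.append(ch)
--         elif ch.isspace():
--             if current:
--                 tokens.append("".join(current))
--                 current.clear()
--         else:
--             current.append(ch)
--     if current:
--         tokens.append("".join(current))
--     return tokens
-- ===== SOURCE B (Python) =====
-- def tokenize_meta(text: str) -> list[str]: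
--     return text.replace("(", " ( ").replace(")", " ) ").split()
-- ===== Notes on version B (the rewrite author's own statement) =====
-- stated objective: idiomatic
-- what changed: Replaces the per-character scan with an accumulator buffer by a two-pass transform-then-split: pad every parenthesis with spaces via str.replace, then delegate tokenization to no-arg str.split().
import Mathlib
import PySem

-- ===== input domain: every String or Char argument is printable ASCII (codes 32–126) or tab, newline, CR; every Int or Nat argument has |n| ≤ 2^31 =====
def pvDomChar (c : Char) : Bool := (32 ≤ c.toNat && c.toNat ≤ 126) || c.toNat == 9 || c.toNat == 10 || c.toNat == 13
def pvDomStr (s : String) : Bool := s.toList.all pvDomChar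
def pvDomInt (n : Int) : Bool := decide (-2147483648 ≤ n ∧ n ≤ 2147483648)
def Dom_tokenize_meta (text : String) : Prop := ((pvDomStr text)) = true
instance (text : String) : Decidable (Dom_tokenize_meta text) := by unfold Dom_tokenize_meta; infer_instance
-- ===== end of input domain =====

-- B replaces A's character scan with an accumulator by transform-then-split:
-- pad each parenthesis with spaces via str.replace, then delegate to no-arg str.split().

-- ===== PORT A =====
-- one loop step of A: state = (tokens so far, current buffer of chars in order)
def tokAStep (st : List String × List Char) (ch : Char) : List String × List Char :=
  if ch = '(' ∨ ch = ')' then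
    ((if st.2.isEmpty then st.1 else st.1 ++ [String.ofList st.2]) ++ [String.ofList [ch]], [])
  else if PySem.Chars.isspace ch then
    ((if st.2.isEmpty then st.1 else st.1 ++ [String.ofList st.2]), [])
  else
    (st.1, st.2 ++ [ch])

def tokenize_meta (text : String) : List String :=
  let st := text.toList.foldl tokAStep ([], [])
  if st.2.isEmpty then st.1 else st.1 ++ [String.ofList st.2]

-- ===== PORT B =====
def tokenize_meta_alt (text : String) : List String :=
  PySem.Str.split₀ (PySem.Str.replace (PySem.Str.replace text "(" " ( ") ")" " ) ")

-- ===== PRECONDITION & SPEC =====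
def Spec_tokenize_meta (text : String) (out : List String) : Prop := out = tokenize_meta_alt text
instance (text : String) (out : List String) : Decidable (Spec_tokenize_meta text out) := by unfold Spec_tokenize_meta; infer_instance

-- ===== CLAIM (what is proved, stated in full; the proofs are below) =====
def Claim_equal_tokenize_meta : Prop := ∀ (text : String), Dom_tokenize_meta text → Spec_tokenize_meta text (tokenize_meta text)

-- ===== LEMMAS AND PROOFS =====

-- replacing a single-character pattern is a flatMap
theorem replace_go_single (a : Char) (new : List Char) :
    ∀ (l : List Char) (fuel : Nat) (acc : List Char), l.length ≤ fuel →
      PySem.Chars.replace.go [a] new fuel l acc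
        = acc.reverse ++ l.flatMap (fun c => if c = a then new else [c]) := by
  intro l
  induction l with
  | nil =>
      intro fuel acc _
      cases fuel <;> simp [PySem.Chars.replace.go]
  | cons c t ih =>
      intro fuel acc h
      cases fuel with
      | zero => simp at h
      | succ f =>
        by_cases hc : c = a
        · subst hc
          have : List.isPrefixOf [c] (c :: t) = true := by simp [List.isPrefixOf]
          rw [PySem.Chars.replace.go]
          simp only [this, if_true, List.length_cons, List.length_nil, List.drop_succ_cons,
            List.drop_zero]
          rw [ih f (new.reverse ++ acc) (by simpa using Nat.le_of_succ_le_succ h)]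
          simp
        · have : List.isPrefixOf [a] (c :: t) = false := by
            simp [List.isPrefixOf]; exact fun h' => (hc h'.symm).elim
          rw [PySem.Chars.replace.go]
          simp only [this, Bool.false_eq_true, if_false]
          rw [ih f (c :: acc) (by simpa using Nat.le_of_succ_le_succ h)]
          simp [hc]

theorem replace_single (a : Char) (new cs : List Char) :
    PySem.Chars.replace cs [a] new
      = cs.flatMap (fun c => if c = a then new else [c]) := by
  rw [PySem.Chars.replace]
  simp only [List.isEmpty_cons, Bool.false_eq_true, if_false]
  simpa using replace_go_single a new cs cs.length [] le_rfl

-- the per-character expansion performed by the two replaces together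
def padChar (c : Char) : List Char :=
  if c = '(' then [' ', '(', ' '] else if c = ')' then [' ', ')', ' '] else [c]

theorem double_replace (cs : List Char) :
    PySem.Chars.replace (PySem.Chars.replace cs "(".toList " ( ".toList) ")".toList " ) ".toList
      = cs.flatMap padChar := by
  show PySem.Chars.replace (PySem.Chars.replace cs ['('] [' ', '(', ' ']) [')'] [' ', ')', ' ']
        = cs.flatMap padChar
  rw [replace_single, replace_single]
  induction cs with
  | nil => rfl
  | cons c t ih =>
      simp only [List.flatMap_cons, List.flatMap_append, ih]
      congr 1
      by_cases h1 : c = '('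
      · subst h1; decide
      · by_cases h2 : c = ')'
        · subst h2; decide
        · simp [h1, h2, padChar]

-- A's finishing step, on char lists
def finishC (st : List (List Char) × List Char) : List (List Char) :=
  if st.2.isEmpty then st.1 else st.1 ++ [st.2]

-- A's loop step, on char lists
def stepC (st : List (List Char) × List Char) (ch : Char) : List (List Char) × List Char :=
  if ch = '(' ∨ ch = ')' then
    ((if st.2.isEmpty then st.1 else st.1 ++ [st.2]) ++ [[ch]], [])
  else if PySem.Chars.isspace ch then
    ((if st.2.isEmpty then st.1 else st.1 ++ [st.2]), [])
  else
    (st.1, st.2 ++ [ch])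

theorem split₀_go_pad (cs : List Char) :
    ∀ (cur : List Char) (acc : List (List Char)),
      PySem.Chars.split₀.go (cs.flatMap padChar) cur acc
        = finishC (cs.foldl stepC (acc.reverse, cur.reverse)) := by
  have hspS : PySem.Chars.isspace ' ' = true := by decide
  have hspL : PySem.Chars.isspace '(' = false := by decide
  have hspR : PySem.Chars.isspace ')' = false := by decide
  induction cs with
  | nil =>
      intro cur acc
      simp only [List.flatMap_nil, List.foldl_nil, finishC]
      rw [PySem.Chars.split₀.go]
      by_cases h : cur.isEmpty
      · simp [List.isEmpty_iff.mp h]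
      · have : cur.reverse.isEmpty = false := by
          simp [List.isEmpty_iff] at h ⊢; exact h
        simp [h, this]
  | cons c t ih =>
      intro cur acc
      by_cases h1 : c = '('
      · subst h1
        show PySem.Chars.split₀.go (' ' :: '(' :: ' ' :: t.flatMap padChar) cur acc = _
        by_cases hc : cur.isEmpty
        · simp only [PySem.Chars.split₀.go, hspS, hspL, hc, if_true, Bool.false_eq_true,
            if_false, List.isEmpty_cons, List.reverse_cons, List.reverse_nil, List.nil_append]
          rw [ih [] (['('] :: acc)]
          simp [stepC, List.isEmpty_iff.mp hc, finishC]
        · simp only [PySem.Chars.split₀.go, hspS, hspL, hc, if_true, Bool.false_eq_true,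
            if_false, List.isEmpty_cons, List.reverse_cons, List.reverse_nil, List.nil_append]
          rw [ih [] (['('] :: (cur.reverse :: acc))]
          have hne : cur.reverse.isEmpty = false := by
            simp [List.isEmpty_iff] at hc ⊢; exact hc
          simp [stepC, hne, finishC]
      · by_cases h2 : c = ')'
        · subst h2
          show PySem.Chars.split₀.go (' ' :: ')' :: ' ' :: t.flatMap padChar) cur acc = _
          by_cases hc : cur.isEmpty
          · simp only [PySem.Chars.split₀.go, hspS, hspR, hc, if_true, Bool.false_eq_true,
              if_false, List.isEmpty_cons, List.reverse_cons, List.reverse_nil, List.nil_append]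
            rw [ih [] ([')'] :: acc)]
            simp [stepC, h1, List.isEmpty_iff.mp hc, finishC]
          · simp only [PySem.Chars.split₀.go, hspS, hspR, hc, if_true, Bool.false_eq_true,
              if_false, List.isEmpty_cons, List.reverse_cons, List.reverse_nil, List.nil_append]
            rw [ih [] ([')'] :: (cur.reverse :: acc))]
            have hne : cur.reverse.isEmpty = false := by
              simp [List.isEmpty_iff] at hc ⊢; exact hc
            simp [stepC, h1, hne, finishC]
        · have hpad : padChar c = [c] := by simp [padChar, h1, h2]
          show PySem.Chars.split₀.go (padChar c ++ t.flatMap padChar) cur acc = _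
          rw [hpad, List.singleton_append]
          by_cases hsp : PySem.Chars.isspace c
          · rw [PySem.Chars.split₀.go]
            simp only [hsp, if_true]
            by_cases hc : cur.isEmpty
            · simp only [hc, if_true]
              rw [ih [] acc]
              simp [stepC, h1, h2, hsp, List.isEmpty_iff.mp hc]
            · simp only [hc, Bool.false_eq_true, if_false]
              rw [ih [] (cur.reverse :: acc)]
              have hne : cur.reverse.isEmpty = false := by
                simp [List.isEmpty_iff] at hc ⊢; exact hc
              simp [stepC, h1, h2, hsp, hne]
          · rw [PySem.Chars.split₀.go]
            simp only [hsp, Bool.false_eq_true, if_false]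
            rw [ih (c :: cur) acc]
            simp [stepC, h1, h2, hsp]

-- A's String-level fold is the char-list fold, mapped through String.ofList
theorem foldA_eq_stepC (cs : List Char) :
    ∀ (toks : List (List Char)) (cur : List Char),
      cs.foldl tokAStep (toks.map String.ofList, cur)
        = (((cs.foldl stepC (toks, cur)).1.map String.ofList), (cs.foldl stepC (toks, cur)).2) := by
  induction cs with
  | nil => intro toks cur; rfl
  | cons c t ih =>
      intro toks cur
      simp only [List.foldl_cons]
      by_cases h1 : c = '(' ∨ c = ')'
      · by_cases hc : cur.isEmpty
        · have := ih (toks ++ [[c]]) []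
          simpa [tokAStep, stepC, h1, hc] using this
        · have := ih (toks ++ [cur] ++ [[c]]) []
          simpa [tokAStep, stepC, h1, hc] using this
      · by_cases hsp : PySem.Chars.isspace c
        · by_cases hc : cur.isEmpty
          · have := ih toks []
            simpa [tokAStep, stepC, h1, hsp, hc] using this
          · have := ih (toks ++ [cur]) []
            simpa [tokAStep, stepC, h1, hsp, hc] using this
        · have := ih toks (cur ++ [c])
          simpa [tokAStep, stepC, h1, hsp] using this

-- ===== VERDICT (by name: the statement is the Claim_ definition above) =====
theorem tokenize_meta_spec : Claim_equal_tokenize_meta := by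
  intro text _
  show tokenize_meta text = tokenize_meta_alt text
  unfold tokenize_meta tokenize_meta_alt
  rw [PySem.Str.split₀, PySem.Str.toList_replace, PySem.Str.toList_replace, double_replace,
      PySem.Chars.split₀, split₀_go_pad text.toList [] []]
  have hf := foldA_eq_stepC text.toList [] []
  simp only [List.map_nil] at hf
  simp only [hf, List.reverse_nil]
  by_cases h : (List.foldl stepC ([], []) text.toList).2 = []
  · simp [finishC, h]
  · have hne : (List.foldl stepC ([], []) text.toList).2.isEmpty = false := by
      simpa [List.isEmpty_iff] using h
    simp [finishC, hne]
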